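-- pv_equiv track=rewrite | github.com/pvliesdonk/chart-binder | src/chart_binder/decisions_db.py | extract_override_targets
-- ===== SOURCE A (Python) =====
-- from typing import Any
--
-- def extract_override_targets(
--     override: dict[str, Any],
-- ) -> tuple[str | None, str | None]:
--     """Extract CRG/RR targets from a stored override row."""
--     crg_mbid = override.get("target_crg_mbid")
--     rr_mbid = override.get("target_rr_mbid")
--
--     if crg_mbid or rr_mbid:
--         return crg_mbid, rr_mbid
--
--     directive = override.get("directive")
--     if not directive:
--         return None, None
--
--     parts = [part.strip() for part in directive.split(",") if part.strip()]
--     for part in parts: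
--         if part.startswith("prefer_rg="):
--             crg_mbid = part.replace("prefer_rg=", "", 1).strip() or crg_mbid
--         if part.startswith("prefer_release="):
--             rr_mbid = part.replace("prefer_release=", "", 1).strip() or rr_mbid
--
--     return crg_mbid, rr_mbid
-- ===== SOURCE B (Python) =====
-- def extract_override_targets(override):
--     """Extract CRG/RR targets from a stored override row."""
--     crg_mbid = override.get("target_crg_mbid")
--     rr_mbid = override.get("target_rr_mbid")
--
--     if crg_mbid or rr_mbid:
--         return crg_mbid, rr_mbid
--
--     directive = override.get("directive")
--     if not directive:
--         return None, None
--
--     # Parse the directive into a key -> value table (last non-empty value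
--     # per key wins), then look up the two keys of interest.
--     parsed = {}
--     for raw in directive.split(","):
--         part = raw.strip()
--         if not part:
--             continue
--         key, sep, value = part.partition("=")
--         value = value.strip()
--         if sep and value:
--             parsed[key] = value
--
--     return parsed.get("prefer_rg") or crg_mbid, parsed.get("prefer_release") or rr_mbid
-- ===== Notes on version B (the rewrite author's own statement) =====
-- stated objective: idiomatic
-- what changed: B replaces A's per-part prefix-branching scan (startswith + replace-prefix per target inside the loop) with a parse-once decomposition: split each part at its first '=' via partition, build a key->value table keeping the last non-empty value, then answer both targets by table lookup with the 'or previous' fallback.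
import Mathlib
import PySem

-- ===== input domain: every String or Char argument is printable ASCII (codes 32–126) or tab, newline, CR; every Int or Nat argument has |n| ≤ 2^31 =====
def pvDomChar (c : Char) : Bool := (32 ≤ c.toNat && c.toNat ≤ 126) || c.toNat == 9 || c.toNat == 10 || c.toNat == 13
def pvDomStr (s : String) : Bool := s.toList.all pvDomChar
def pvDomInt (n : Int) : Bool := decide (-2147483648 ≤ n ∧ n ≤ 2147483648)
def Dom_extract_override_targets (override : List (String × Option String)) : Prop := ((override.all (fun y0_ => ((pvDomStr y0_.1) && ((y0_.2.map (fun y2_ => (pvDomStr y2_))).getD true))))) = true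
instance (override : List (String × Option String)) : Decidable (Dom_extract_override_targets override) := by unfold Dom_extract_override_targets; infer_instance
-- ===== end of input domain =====

-- B replaces A's per-part prefix-branching scan with a partition-into-table-then-lookup
-- decomposition (idiomatic restructuring, same cost).

-- ===== PORT A =====

-- Python truthiness of an Optional[str]
def pyTruthyOpt (x : Option String) : Bool :=
  match x with
  | none => false
  | some s => !(s == "")

-- `cs or y` where cs are the chars of a str and y : Optional[str]
def pyOrChars (s : List Char) (y : Option String) : Option String :=
  if s.isEmpty then y else some (String.ofList s)

-- exact port of s.replace(old, new, 1): replace the FIRST occurrence of old only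
def replaceOnce (old new : List Char) : List Char → List Char
  | [] => if old.isPrefixOf ([] : List Char) then new else []
  | c :: cs =>
    if old.isPrefixOf (c :: cs) then new ++ (c :: cs).drop old.length
    else c :: replaceOnce old new cs

def extract_override_targets (override : List (String × Option String)) : Option String × Option String :=
  let crg_mbid := (PySem.Dict.mk override).getD "target_crg_mbid" none
  let rr_mbid := (PySem.Dict.mk override).getD "target_rr_mbid" none
  if pyTruthyOpt crg_mbid || pyTruthyOpt rr_mbid then (crg_mbid, rr_mbid)
  else
    let directive := (PySem.Dict.mk override).getD "directive" none
    match directive with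
    | none => (none, none)
    | some d =>
      if d == "" then (none, none)
      else
        let parts := ((PySem.Chars.splitOn d.toList [',']).map PySem.Chars.strip).filter
          (fun p => !p.isEmpty)
        parts.foldl
          (fun (st : Option String × Option String) part =>
            let c := if PySem.Chars.startswith part "prefer_rg=".toList then
                pyOrChars (PySem.Chars.strip (replaceOnce "prefer_rg=".toList [] part)) st.1
              else st.1
            let r := if PySem.Chars.startswith part "prefer_release=".toList then
                pyOrChars (PySem.Chars.strip (replaceOnce "prefer_release=".toList [] part)) st.2
              else st.2
            (c, r))
          (crg_mbid, rr_mbid)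

-- ===== PORT B =====

-- exact port of part.partition("=") for the single-character separator "="
-- (key before the first '=', found-flag, rest after it)
def partitionEq : List Char → List Char × Bool × List Char
  | [] => ([], false, [])
  | c :: cs =>
    if c = '=' then ([], true, cs)
    else
      let (k, f, v) := partitionEq cs
      (c :: k, f, v)

-- `x or y` where x y : Optional[str]
def pyOrOpt (x y : Option String) : Option String :=
  if pyTruthyOpt x then x else y

def extract_override_targets_alt (override : List (String × Option String)) : Option String × Option String :=
  let crg_mbid := (PySem.Dict.mk override).getD "target_crg_mbid" none
  let rr_mbid := (PySem.Dict.mk override).getD "target_rr_mbid" none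
  if pyTruthyOpt crg_mbid || pyTruthyOpt rr_mbid then (crg_mbid, rr_mbid)
  else
    let directive := (PySem.Dict.mk override).getD "directive" none
    match directive with
    | none => (none, none)
    | some d =>
      if d == "" then (none, none)
      else
        let parsed := (PySem.Chars.splitOn d.toList [',']).foldl
          (fun (parsed : PySem.Dict String String) raw =>
            let part := PySem.Chars.strip raw
            if part.isEmpty then parsed
            else
              let (k, f, v) := partitionEq part
              let value := PySem.Chars.strip v
              if f && !value.isEmpty then parsed.insert (String.ofList k) (String.ofList value)
              else parsed)
          PySem.Dict.empty
        (pyOrOpt (parsed.get? "prefer_rg") crg_mbid, pyOrOpt (parsed.get? "prefer_release") rr_mbid)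

-- ===== PRECONDITION & SPEC =====
def Spec_extract_override_targets (override : List (String × Option String)) (out : Option String × Option String) : Prop := out = extract_override_targets_alt override
instance (override : List (String × Option String)) (out : Option String × Option String) : Decidable (Spec_extract_override_targets override out) := by unfold Spec_extract_override_targets; infer_instance

-- ===== CLAIM (what is proved, stated in full; the proofs are below) =====
def Claim_equal_extract_override_targets : Prop := ∀ (override : List (String × Option String)), Dom_extract_override_targets override → Spec_extract_override_targets override (extract_override_targets override)

-- ===== LEMMAS AND PROOFS =====

-- the value a (stripped) part contributes for a given key, phrased through partitionEq
def pvVal (key p : List Char) : Option (List Char) :=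
  if (partitionEq p).2.1 = true ∧ (partitionEq p).1 = key ∧ PySem.Chars.strip (partitionEq p).2.2 ≠ []
  then some (PySem.Chars.strip (partitionEq p).2.2) else none

-- last non-none pvVal over the stripped, non-empty parts
def pvLastP (key : List Char) : List (List Char) → Option (List Char)
  | [] => none
  | p :: ps => (pvLastP key ps).orElse (fun _ => pvVal key p)

-- last non-none pvVal over the RAW comma-parts (empty stripped parts skipped)
def pvLastR (key : List Char) : List (List Char) → Option (List Char)
  | [] => none
  | r :: rs => (pvLastR key rs).orElse
      (fun _ => if (PySem.Chars.strip r).isEmpty then none else pvVal key (PySem.Chars.strip r))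

def pvOrE (o : Option (List Char)) (y : Option String) : Option String :=
  match o with
  | some v => some (String.ofList v)
  | none => y

theorem partitionEq_of_prefix (key v : List Char) (hk : '=' ∉ key) :
    partitionEq (key ++ '=' :: v) = (key, true, v) := by
  induction key with
  | nil => simp [partitionEq]
  | cons c cs ih =>
    have hc : c ≠ '=' := by intro h; exact hk (by simp [h])
    have hcs : '=' ∉ cs := fun h => hk (List.mem_cons_of_mem _ h)
    simp [partitionEq, hc, ih hcs]

theorem partitionEq_spec (p : List Char) :
    (partitionEq p).2.1 = true →
      p = (partitionEq p).1 ++ '=' :: (partitionEq p).2.2 ∧ '=' ∉ (partitionEq p).1 := by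
  induction p with
  | nil => simp [partitionEq]
  | cons c cs ih =>
    by_cases hc : c = '='
    · simp [partitionEq, hc]
    · simp only [partitionEq, if_neg hc]
      intro hf
      obtain ⟨h1, h2⟩ := ih hf
      refine ⟨by simpa using congrArg (c :: ·) h1, ?_⟩
      intro hmem
      rcases List.mem_cons.mp hmem with h | h
      · exact hc h.symm
      · exact h2 h

theorem replaceOnce_prefix (old new v : List Char) :
    replaceOnce old new (old ++ v) = new ++ v := by
  cases hov : old ++ v with
  | nil =>
    obtain ⟨ho, hv⟩ : old = [] ∧ v = [] := by simpa using hov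
    subst ho hv
    simp [replaceOnce]
  | cons c cs =>
    have hpre : old.isPrefixOf (c :: cs) = true := by
      rw [← hov]; simp [List.isPrefixOf_iff_prefix]
    rw [replaceOnce, if_pos hpre, ← hov, List.drop_left]

-- A's per-part branch for key ++ "=" equals the partition-based pvVal
theorem step_eq (key : List Char) (hk : '=' ∉ key) (p : List Char) (y : Option String) :
    (if PySem.Chars.startswith p (key ++ ['=']) = true then
        pyOrChars (PySem.Chars.strip (replaceOnce (key ++ ['=']) [] p)) y
      else y) = pvOrE (pvVal key p) y := by
  by_cases h : (key ++ ['=']) <+: p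
  · obtain ⟨v, rfl⟩ := h
    have hsw : PySem.Chars.startswith (key ++ ['='] ++ v) (key ++ ['=']) = true :=
      (PySem.Chars.startswith_iff _ _).mpr ⟨v, rfl⟩
    have hpart : partitionEq (key ++ '=' :: v) = (key, true, v) :=
      partitionEq_of_prefix key v hk
    have hr : replaceOnce (key ++ ['=']) [] (key ++ ['='] ++ v) = v := by
      simpa using replaceOnce_prefix (key ++ ['=']) [] v
    rw [if_pos hsw, hr]
    by_cases hv : PySem.Chars.strip v = []
    · simp [pvVal, hpart, hv, pyOrChars, pvOrE, List.append_assoc]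
    · simp [pvVal, hpart, hv, pyOrChars, pvOrE, List.isEmpty_iff, List.append_assoc]

  · have hsw : PySem.Chars.startswith p (key ++ ['=']) = false := by
      rw [Bool.eq_false_iff]
      intro hc
      exact h ((PySem.Chars.startswith_iff _ _).mp hc)
    rw [if_neg (by simp [hsw])]
    by_cases hfb : (partitionEq p).2.1 = true
    · obtain ⟨hp, hne⟩ := partitionEq_spec p hfb
      by_cases hkey : (partitionEq p).1 = key
      · refine absurd ⟨(partitionEq p).2.2, ?_⟩ h
        conv_rhs => rw [hp]
        rw [hkey]
        simp
      · simp [pvVal, pvOrE, hkey]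
    · simp [pvVal, pvOrE, hfb]

theorem pvOrE_orElse (a b : Option (List Char)) (y : Option String) :
    pvOrE (b.orElse (fun _ => a)) y = pvOrE b (pvOrE a y) := by
  cases b <;> cases a <;> simp [pvOrE, Option.orElse]

theorem pvVal_ne_nil (key p v : List Char) (h : pvVal key p = some v) : v ≠ [] := by
  unfold pvVal at h
  split at h
  · rename_i hc
    simp only [Option.some.injEq] at h
    exact h ▸ hc.2.2
  · exact absurd h (by simp)

theorem pvLastR_ne_nil (key : List Char) (rs : List (List Char)) (v : List Char)
    (h : pvLastR key rs = some v) : v ≠ [] := by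
  induction rs with
  | nil => simp [pvLastR] at h
  | cons r rs ih =>
    simp only [pvLastR] at h
    cases hr : pvLastR key rs with
    | some w =>
      rw [hr] at h
      simp only [Option.orElse] at h
      exact ih (hr.trans (by simpa using h))
    | none =>
      rw [hr] at h
      simp only [Option.orElse] at h
      split at h
      · exact absurd h (by simp)
      · exact pvVal_ne_nil _ _ _ h

-- characterisation of A's fold over the stripped, non-empty parts
theorem foldA_eq (parts : List (List Char)) (st : Option String × Option String) :
    parts.foldl
        (fun (st : Option String × Option String) part =>
          let c := if PySem.Chars.startswith part "prefer_rg=".toList then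
              pyOrChars (PySem.Chars.strip (replaceOnce "prefer_rg=".toList [] part)) st.1
            else st.1
          let r := if PySem.Chars.startswith part "prefer_release=".toList then
              pyOrChars (PySem.Chars.strip (replaceOnce "prefer_release=".toList [] part)) st.2
            else st.2
          (c, r)) st
      = (pvOrE (pvLastP "prefer_rg".toList parts) st.1,
         pvOrE (pvLastP "prefer_release".toList parts) st.2) := by
  induction parts generalizing st with
  | nil => simp [pvLastP, pvOrE]
  | cons p ps ih =>
    have e1 : ("prefer_rg=".toList : List Char) = "prefer_rg".toList ++ ['='] := by decide
    have e2 : ("prefer_release=".toList : List Char) = "prefer_release".toList ++ ['='] := by decide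
    rw [List.foldl_cons, ih]
    simp only [pvLastP]
    rw [pvOrE_orElse, pvOrE_orElse]
    refine Prod.ext ?_ ?_
    · show pvOrE (pvLastP "prefer_rg".toList ps)
        (if PySem.Chars.startswith p "prefer_rg=".toList then
            pyOrChars (PySem.Chars.strip (replaceOnce "prefer_rg=".toList [] p)) st.1
          else st.1) = _
      rw [e1, step_eq "prefer_rg".toList (by decide) p st.1]
    · show pvOrE (pvLastP "prefer_release".toList ps)
        (if PySem.Chars.startswith p "prefer_release=".toList then
            pyOrChars (PySem.Chars.strip (replaceOnce "prefer_release=".toList [] p)) st.2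
          else st.2) = _
      rw [e2, step_eq "prefer_release".toList (by decide) p st.2]

-- characterisation of B's dict-building fold: lookup = last stored value, else the start dict
theorem foldB_get (key : List Char) (raws : List (List Char)) (d : PySem.Dict String String) :
    (raws.foldl
        (fun (parsed : PySem.Dict String String) raw =>
          let part := PySem.Chars.strip raw
          if part.isEmpty then parsed
          else
            let (k, f, v) := partitionEq part
            let value := PySem.Chars.strip v
            if f && !value.isEmpty then parsed.insert (String.ofList k) (String.ofList value)
            else parsed) d).get? (String.ofList key)
      = ((pvLastR key raws).map String.ofList).orElse (fun _ => d.get? (String.ofList key)) := by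
  induction raws generalizing d with
  | nil => simp [pvLastR, Option.orElse]
  | cons r rs ih =>
    rw [List.foldl_cons, ih]
    simp only [pvLastR]
    cases hlast : pvLastR key rs with
    | some w => simp [Option.orElse]
    | none =>
      have hinj : ∀ x y2 : List Char, String.ofList x = String.ofList y2 → x = y2 := by
        intro x y2 h
        have := congrArg String.toList h
        simpa using this
      by_cases hemp : (PySem.Chars.strip r).isEmpty = true
      · simp [hemp, Option.orElse]
      · by_cases hf : (partitionEq (PySem.Chars.strip r)).2.1 = true
        · by_cases hv : PySem.Chars.strip (partitionEq (PySem.Chars.strip r)).2.2 = []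
          · simp [hemp, hf, hv, pvVal, Option.orElse]
          · have hcond : ((partitionEq (PySem.Chars.strip r)).2.1 &&
                !(PySem.Chars.strip (partitionEq (PySem.Chars.strip r)).2.2).isEmpty) = true := by
              simp [hf, hv]
            simp only [hemp, Bool.false_eq_true, if_false, hcond, if_pos]
            rw [PySem.Dict.get?_insert]
            by_cases hkey : key = (partitionEq (PySem.Chars.strip r)).1
            · simp [hkey, pvVal, hf, hv, Option.orElse]
            · have : ¬ String.ofList key = String.ofList (partitionEq (PySem.Chars.strip r)).1 :=
                fun h => hkey (hinj _ _ h)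
              simp [this, pvVal, Ne.symm hkey, Option.orElse]
        · simp [hemp, hf, pvVal, Option.orElse]

-- A's parts list (stripped, empties dropped) gives the same last value as the raw parts
theorem pvLastP_filter (key : List Char) (raws : List (List Char)) :
    pvLastP key (((raws.map PySem.Chars.strip).filter (fun p => !p.isEmpty)))
      = pvLastR key raws := by
  induction raws with
  | nil => simp [pvLastP, pvLastR]
  | cons r rs ih =>
    simp only [List.map_cons, List.filter_cons]
    by_cases hemp : (PySem.Chars.strip r).isEmpty = true
    · simp only [hemp, Bool.not_true, Bool.false_eq_true, if_false, pvLastR]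
      cases h : pvLastR key rs with
      | none => simp [Option.orElse, ih, h]
      | some w => simp [Option.orElse, ih, h]
    · have hemp' : (PySem.Chars.strip r).isEmpty = false := by simpa using hemp
      simp [hemp', pvLastP, pvLastR, ih]

theorem ofList_beq_empty (v : List Char) (hv : v ≠ []) : (String.ofList v == "") = false := by
  rw [beq_eq_false_iff_ne]
  intro h
  have := congrArg String.toList h
  simp at this
  exact hv this

theorem pvOrE_eq_pyOrOpt (o : Option (List Char)) (c : Option String)
    (h : ∀ v, o = some v → v ≠ []) :
    pyOrOpt ((o.map String.ofList).orElse (fun _ => none)) c = pvOrE o c := by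
  cases o with
  | none => simp [pyOrOpt, pvOrE, Option.orElse, pyTruthyOpt]
  | some v =>
    simp [pyOrOpt, pvOrE, Option.orElse, pyTruthyOpt, ofList_beq_empty v (h v rfl)]

-- ===== VERDICT (by name: the statement is the Claim_ definition above) =====
theorem extract_override_targets_spec : Claim_equal_extract_override_targets := by
  intro override _
  unfold Spec_extract_override_targets
  simp only [extract_override_targets, extract_override_targets_alt]
  by_cases h1 : (pyTruthyOpt ((PySem.Dict.mk override).getD "target_crg_mbid" none)
      || pyTruthyOpt ((PySem.Dict.mk override).getD "target_rr_mbid" none)) = true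
  · simp [h1]
  · simp only [h1, Bool.false_eq_true, if_false]
    cases hd : (PySem.Dict.mk override).getD "directive" none with
    | none => rfl
    | some dstr =>
      by_cases hde : (dstr == "") = true
      · simp [hde]
      · simp only [hde, Bool.false_eq_true, if_false]
        rw [show ("prefer_rg" : String) = String.ofList "prefer_rg".toList from by decide,
          show ("prefer_release" : String) = String.ofList "prefer_release".toList from by decide]
        rw [foldA_eq, foldB_get, foldB_get]
        simp only [PySem.Dict.get?_empty]
        rw [pvLastP_filter "prefer_rg".toList, pvLastP_filter "prefer_release".toList]
        refine Prod.ext ?_ ?_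
        · exact (pvOrE_eq_pyOrOpt _ _
            (fun v hv => pvLastR_ne_nil _ _ _ hv)).symm
        · exact (pvOrE_eq_pyOrOpt _ _
            (fun v hv => pvLastR_ne_nil _ _ _ hv)).symm
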